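/- GENERATED by farm/mkstatement.py from design/units.tsv (unit `start_decoder.R14c`) and the assertions of Vorbis/Spec/StartDecoderR14.lean — do not edit.
   THE STATEMENT of the proof unit `start_decoder.R14c`: segment R14c of `start_decoder` (8 instructions; entries 0x116596;
   exits 0x1165b7; ranges 0x116596-0x1165b2)
   takes each of its entry assertions to one of its exit assertions (`Vorbis.Spec.StartDecoder.SegR14c`), given the contracts of its callees.
   What the names mean: Vorbis/Spec/Basic.lean (the shared hypotheses), Vorbis/Spec/StartDecoderR14.lean (the assertions). The theorem to prove:
   `theorem start_decoder_R14c_ok : Vorbis.Spec.start_decoder_R14c.Statement`. -/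
import Vorbis.Spec.Reader
import Vorbis.Spec.StartDecoderR14
namespace Vorbis.Spec.start_decoder_R14c
open X86 X86.User Asan

/-- The statement of unit `start_decoder.R14c`. -/
def Statement : Prop :=
  ∀ (Lay : Layout) (_hLay : Lay.hi = 0x1000000) (μ : Microarch) (_hμ : UserX.MicroOK μ) (u₀ : State)
    (_hcode : HasCodeNat Lay u₀ Vorbis.L.start_decoder.entry Vorbis.Code.code_start_decoder.nat Vorbis.L.start_decoder.size)
    (_h_get_bits : ∀ (others : List Obj) (frames : List (Nat × FrameLayout)) (Blk : Block → Prop) (len : Nat), Calls Lay μ Vorbis.WayInv (Vorbis.conv u₀) Vorbis.L.get_bits.entry (Vorbis.Spec.get_bits.spec others frames Blk len))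
    (_h_asan_store2_noabort : Asan.SmallCheck Lay μ Vorbis.WayInv (Vorbis.CodeOK u₀) [.rax, .rcx, .rdx] 2 Vorbis.L.__asan_store2_noabort.entry),
    Vorbis.Spec.StartDecoder.SegR14c Lay μ u₀

end Vorbis.Spec.start_decoder_R14c
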